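-- pv_equiv track=rewrite | github.com/cathywzeng/aliyun_oss | scripts/latex_to_unicode.py | _expand_superscripts
-- ===== SOURCE A (Python) =====
-- SUP_LATIN = {
--     'a':'ᵃ','b':'ᵇ','c':'ᶜ','d':'ᵈ','e':'ᵉ','f':'ᶠ','g':'ᵍ','h':'ʰ','i':'ᶦ',
--     'j':'ʲ','k':'ᵏ','l':'ˡ','m':'ᵐ','n':'ⁿ','o':'ᵒ','p':'ᵖ','r':'ʳ','s':'ˢ',
--     't':'ᵗ','u':'ᵘ','v':'ᵛ','w':'ʷ','x':'ˣ','y':'ʸ','z':'ᶻ'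
-- }
--
-- def _match_brace(s, start):
--     """Find matching close brace for the '{' at position start (depth-counting)."""
--     if start >= len(s) or s[start] != '{':
--         return None, start
--     depth = 0
--     i = start
--     while i < len(s):
--         if s[i] == '{': depth += 1
--         elif s[i] == '}':
--             depth -= 1
--             if depth == 0:
--                 return s[start+1:i], i + 1
--         i += 1
--     return None, start
--
-- def _sup_chars(s):
--     """Convert a string to Unicode superscript characters."""
--     out = []
--     for c in s:
--         if c in SUP_LATIN:
--             out.append(SUP_LATIN[c])
--         elif c.isdigit():
--             sups = {'0':'⁰','1':'¹','2':'²','3':'³','4':'⁴',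
--                     '5':'⁵','6':'⁶','7':'⁷','8':'⁸','9':'⁹'}
--             out.append(sups.get(c, c))
--         else:
--             out.append(c)
--     return ''.join(out)
--
-- def _expand_superscripts(s):
--     """Expand x^{abc} and x^2 -> Unicode superscript."""
--     parts = []
--     i = 0
--     while i < len(s):
--         if s[i] == '^' and i + 1 < len(s) and s[i+1] == '{':
--             content, end = _match_brace(s, i+1)
--             if content is not None:
--                 parts.append(_sup_chars(content))
--                 i = end
--                 continue
--         elif s[i] == '^' and i + 2 < len(s) and s[i+1].isalnum():
--             parts.append(_sup_chars(s[i+1]))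
--             i += 2
--             continue
--         parts.append(s[i])
--         i += 1
--     return ''.join(parts)
-- ===== SOURCE B (Python) =====
-- _SUP = dict(zip("abcdefghijklmnoprstuvwxyz0123456789",
--                 "\u1d43\u1d47\u1d9c\u1d48\u1d49\u1da0\u1d4d\u02b0\u1da6\u02b2\u1d4f\u02e1\u1d50\u207f\u1d52\u1d56\u02b3\u02e2\u1d57\u1d58\u1d5b\u02b7\u02e3\u02b8\u1dbb\u2070\u00b9\u00b2\u00b3\u2074\u2075\u2076\u2077\u2078\u2079"))
--
--
-- def _conv(c):
--     return _SUP.get(c, c)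
--
--
-- def _expand_singles(t):
--     out = []
--     i = 0
--     while i < len(t):
--         if t[i] == '^' and i + 1 < len(t) and t[i+1].isalnum():
--             out.append(_conv(t[i+1]))
--             i += 2
--         else:
--             out.append(t[i])
--             i += 1
--     return ''.join(out)
--
--
-- def _expand_superscripts(s):
--     # pass 1: every matched brace pair, via one stack sweep
--     stack, pairs = [], []
--     for j, c in enumerate(s):
--         if c == '{':
--             stack.append(j)
--         elif c == '}' and stack:
--             pairs.append((stack.pop(), j))
--     pairs.sort(key=lambda pq: pq[0])
--     # pass 2: pick the caret-groups, greedily left to right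
--     chosen, pos = [], 0
--     for (p, q) in pairs:
--         if pos < p and s[p-1] == '^':
--             chosen.append((p, q))
--             pos = q + 1
--     # pass 3: assemble the output from slices
--     out, pos = [], 0
--     for (p, q) in chosen:
--         out.append(_expand_singles(s[pos:p-1]))
--         out.append(''.join(_conv(c) for c in s[p+1:q]))
--         pos = q + 1
--     out.append(_expand_singles(s[pos:]))
--     return ''.join(out)
-- ===== Notes on version B (the rewrite author's own statement) =====
-- stated objective: alternative
-- what changed: B replaces A's single scan with per-caret depth-counting rescans by three staged passes: one stack sweep collecting every matched brace pair, a greedy left-to-right selection of the caret-groups, and an assembly of the output from slices; the conversion table is built by zipping two parallel strings; A's end-of-string off-by-one ('i + 2 < len(s)') that leaves a trailing 'x^2' unexpanded is fixed.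
-- intended difference: On strings ending in '^' followed by an alphanumeric character, A's 'i + 2 < len(s)' off-by-one returns the trailing superscript unexpanded (A('x^2') = 'x^2') while B returns the intended expansion ('x²'), which is what the docstring ('x^2 -> Unicode superscript') promises. — e.g. on _expand_superscripts("x^2"): A returns "x^2", B returns "x²"
import Mathlib
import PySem

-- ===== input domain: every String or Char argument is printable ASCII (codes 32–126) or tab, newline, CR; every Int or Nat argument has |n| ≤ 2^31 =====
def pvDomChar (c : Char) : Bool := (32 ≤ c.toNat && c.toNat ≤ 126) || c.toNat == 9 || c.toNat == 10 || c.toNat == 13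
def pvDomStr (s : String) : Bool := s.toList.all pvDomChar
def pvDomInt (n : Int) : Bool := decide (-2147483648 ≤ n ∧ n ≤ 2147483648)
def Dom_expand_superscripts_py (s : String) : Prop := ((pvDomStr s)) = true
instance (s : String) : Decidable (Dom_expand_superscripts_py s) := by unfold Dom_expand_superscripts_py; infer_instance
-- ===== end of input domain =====

-- B replaces A's single scan with per-caret depth-counting rescans by three staged passes: one stack
-- sweep collecting every matched brace pair, a greedy left-to-right selection of the caret-groups, and
-- an assembly of the output from slices; it also fixes A's end-of-string off-by-one so a trailing
-- 'x^2' is expanded. Return-value equivalence only.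

-- ===== PORT A =====
-- SUP_LATIN
def pvSupLatin : PySem.Dict Char Char := PySem.Dict.ofList
  [('a','ᵃ'),('b','ᵇ'),('c','ᶜ'),('d','ᵈ'),('e','ᵉ'),('f','ᶠ'),('g','ᵍ'),('h','ʰ'),('i','ᶦ'),
   ('j','ʲ'),('k','ᵏ'),('l','ˡ'),('m','ᵐ'),('n','ⁿ'),('o','ᵒ'),('p','ᵖ'),('r','ʳ'),('s','ˢ'),
   ('t','ᵗ'),('u','ᵘ'),('v','ᵛ'),('w','ʷ'),('x','ˣ'),('y','ʸ'),('z','ᶻ')]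

-- the 'sups' digit dict created inside _sup_chars's loop
def pvSupDigits : PySem.Dict Char Char := PySem.Dict.ofList
  [('0','⁰'),('1','¹'),('2','²'),('3','³'),('4','⁴'),('5','⁵'),('6','⁶'),('7','⁷'),('8','⁸'),('9','⁹')]

-- _sup_chars: per-char loop appending (out accumulated as the joined char list)
def pvSupChars (cs : List Char) : List Char :=
  cs.foldl (fun out c =>
    if pvSupLatin.contains c then out ++ [pvSupLatin.getD c c]
    else if PySem.Chars.isdigit c then out ++ [pvSupDigits.getD c c]
    else out ++ [c]) []

-- the while loop of _match_brace (fuel makes the loop total; fuel > len - i suffices and is what callers pass)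
def pvMatchBraceLoop (cs : List Char) : Nat → Nat → Nat → Int → Option (List Char) × Nat
  | 0, start, _, _ => (none, start)
  | fuel + 1, start, i, depth =>
    if i < cs.length then
      if cs.getD i ' ' = '{' then pvMatchBraceLoop cs fuel start (i+1) (depth+1)
      else if cs.getD i ' ' = '}' then
        if depth - 1 = 0 then
          (some (PySem.List.slice cs (some ((start + 1 : Nat) : Int)) (some ((i : Nat) : Int))), i + 1)
        else pvMatchBraceLoop cs fuel start (i+1) (depth-1)
      else pvMatchBraceLoop cs fuel start (i+1) depth
    else (none, start)

-- _match_brace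
def pvMatchBrace (cs : List Char) (start : Nat) : Option (List Char) × Nat :=
  if cs.length ≤ start ∨ ¬ cs.getD start ' ' = '{' then (none, start)
  else pvMatchBraceLoop cs (cs.length + 1) start start 0

-- the while loop of _expand_superscripts (fuel: i grows by ≥ 1 per iteration, so len + 1 suffices)
def pvMainA (cs : List Char) : Nat → Nat → List Char → List Char
  | 0, _, parts => parts
  | fuel + 1, i, parts =>
    if i < cs.length then
      if cs.getD i ' ' = '^' ∧ i + 1 < cs.length ∧ cs.getD (i+1) ' ' = '{' then
        match pvMatchBrace cs (i+1) with
        | (some content, e) => pvMainA cs fuel e (parts ++ pvSupChars content)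
        | (none, _) => pvMainA cs fuel (i+1) (parts ++ [cs.getD i ' '])
      else if cs.getD i ' ' = '^' ∧ i + 2 < cs.length ∧ PySem.Chars.isalnum (cs.getD (i+1) ' ') = true then
        pvMainA cs fuel (i+2) (parts ++ pvSupChars [cs.getD (i+1) ' '])
      else pvMainA cs fuel (i+1) (parts ++ [cs.getD i ' '])
    else parts

def expand_superscripts_py (s : String) : String :=
  String.ofList (pvMainA s.toList (s.toList.length + 1) 0 [])

-- ===== PORT B =====
-- _SUP = dict(zip(keys, vals)): the table built from two parallel strings
def pvSupB : PySem.Dict Char Char :=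
  PySem.Dict.ofList (List.zip "abcdefghijklmnoprstuvwxyz0123456789".toList
    "ᵃᵇᶜᵈᵉᶠᵍʰᶦʲᵏˡᵐⁿᵒᵖʳˢᵗᵘᵛʷˣʸᶻ⁰¹²³⁴⁵⁶⁷⁸⁹".toList)

-- _conv
def pvConvB (c : Char) : Char := pvSupB.getD c c

-- the while loop of _expand_singles (fuel: i grows by ≥ 1 per iteration, so len + 1 suffices)
def pvSinglesLoop (t : List Char) : Nat → Nat → List Char → List Char
  | 0, _, out => out
  | fuel + 1, i, out =>
    if i < t.length then
      if t.getD i ' ' = '^' ∧ i + 1 < t.length ∧ PySem.Chars.isalnum (t.getD (i+1) ' ') = true then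
        pvSinglesLoop t fuel (i+2) (out ++ [pvConvB (t.getD (i+1) ' ')])
      else pvSinglesLoop t fuel (i+1) (out ++ [t.getD i ' '])
    else out

-- _expand_singles
def pvExpandSingles (t : List Char) : List Char := pvSinglesLoop t (t.length + 1) 0 []

-- pass 1 loop body: stack of open braces, list of matched pairs
def pvPairsStep (st : List Nat × List (Nat × Nat)) (p : Char × Nat) : List Nat × List (Nat × Nat) :=
  if p.1 = '{' then (st.1 ++ [p.2], st.2)
  else if p.1 = '}' ∧ st.1 ≠ [] then (st.1.dropLast, st.2 ++ [(st.1.getLastD 0, p.2)])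
  else st

-- pass 1: every matched brace pair, via one stack sweep over enumerate(s)
def pvPairs (cs : List Char) : List (Nat × Nat) := (cs.zipIdx.foldl pvPairsStep ([], [])).2

-- pass 2 loop body
def pvChooseStep (cs : List Char) (st : List (Nat × Nat) × Nat) (pq : Nat × Nat) :
    List (Nat × Nat) × Nat :=
  if st.2 < pq.1 ∧ cs.getD (pq.1 - 1) ' ' = '^' then (st.1 ++ [pq], pq.2 + 1) else st

-- pass 2: pick the caret-groups, greedily left to right, over the pairs sorted by open position
def pvChosen (cs : List Char) : List (Nat × Nat) :=
  ((PySem.List.sorted (pvPairs cs) (fun pq => pq.1)).foldl (pvChooseStep cs) ([], 0)).1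

-- pass 3 loop body: output so far and resume position
def pvAssembleStep (cs : List Char) (st : List Char × Nat) (pq : Nat × Nat) : List Char × Nat :=
  (st.1 ++ pvExpandSingles (PySem.List.slice cs (some ((st.2 : Nat) : Int)) (some ((pq.1 - 1 : Nat) : Int)))
        ++ (PySem.List.slice cs (some ((pq.1 + 1 : Nat) : Int)) (some ((pq.2 : Nat) : Int))).map pvConvB,
   pq.2 + 1)

def expand_superscripts_py_alt (s : String) : String :=
  let st := (pvChosen s.toList).foldl (pvAssembleStep s.toList) ([], 0)
  String.ofList (st.1 ++ pvExpandSingles (PySem.List.slice s.toList (some ((st.2 : Nat) : Int)) none))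

-- ===== PRECONDITION & SPEC =====
-- On strings ending in '^' followed by an alphanumeric character, A's 'i + 2 < len(s)' off-by-one leaves the
-- trailing superscript unexpanded (A returns e.g. "x^2" unchanged) while B returns the intended expansion "x²".
def D_expand_superscripts_py (s : String) : Prop :=
  2 ≤ s.toList.length ∧ s.toList.getD (s.toList.length - 2) ' ' = '^' ∧
    PySem.Chars.isalnum (s.toList.getD (s.toList.length - 1) ' ') = true
instance (s : String) : Decidable (D_expand_superscripts_py s) := by unfold D_expand_superscripts_py; infer_instance

def Spec_expand_superscripts_py (s : String) (out : String) : Prop :=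
  ¬ D_expand_superscripts_py s → out = expand_superscripts_py_alt s
instance (s : String) (out : String) : Decidable (Spec_expand_superscripts_py s out) := by
  unfold Spec_expand_superscripts_py; infer_instance

def pvDiffWitness_expand_superscripts_py : String := "x^2"
def pvDiffWitnessOut_expand_superscripts_py : String × String := ("x^2", "x²")

-- ===== CLAIM (what is proved, stated in full; the proofs are below) =====
def Claim_unchanged_expand_superscripts_py : Prop :=
  ∀ (s : String), Dom_expand_superscripts_py s → Spec_expand_superscripts_py s (expand_superscripts_py s)
def Claim_changed_expand_superscripts_py : Prop :=
  Dom_expand_superscripts_py (pvDiffWitness_expand_superscripts_py) ∧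
  D_expand_superscripts_py (pvDiffWitness_expand_superscripts_py) ∧
  expand_superscripts_py (pvDiffWitness_expand_superscripts_py) = pvDiffWitnessOut_expand_superscripts_py.1 ∧
  expand_superscripts_py_alt (pvDiffWitness_expand_superscripts_py) = pvDiffWitnessOut_expand_superscripts_py.2 ∧
  pvDiffWitnessOut_expand_superscripts_py.1 ≠ pvDiffWitnessOut_expand_superscripts_py.2
def Claim_exact_expand_superscripts_py : Prop :=
  ∀ (s : String), Dom_expand_superscripts_py s → D_expand_superscripts_py s →
    expand_superscripts_py s ≠ expand_superscripts_py_alt s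

-- ===== LEMMAS AND PROOFS =====

-- A's per-character conversion (the if-chain inside _sup_chars's loop)
def pvConvA (c : Char) : Char :=
  if pvSupLatin.contains c then pvSupLatin.getD c c
  else if PySem.Chars.isdigit c then pvSupDigits.getD c c
  else c

lemma pvSupChars_eq_map (l : List Char) : pvSupChars l = l.map pvConvA := by
  have hbody : (fun (out : List Char) (c : Char) =>
      if pvSupLatin.contains c then out ++ [pvSupLatin.getD c c]
      else if PySem.Chars.isdigit c then out ++ [pvSupDigits.getD c c]
      else out ++ [c]) = fun out c => out ++ [pvConvA c] := by
    funext out c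
    unfold pvConvA
    split_ifs <;> rfl
  unfold pvSupChars
  rw [hbody, PySem.List.foldl_append_singleton_eq_map, List.nil_append]

-- the two conversion tables agree on every character of the input domain
set_option maxRecDepth 100000 in
lemma pvConvAB_aux : ∀ n, n < 127 → pvConvA (Char.ofNat n) = pvConvB (Char.ofNat n) := by decide

lemma pvConvAB (c : Char) (h : pvDomChar c = true) : pvConvA c = pvConvB c := by
  have hn : c.toNat < 127 := by
    unfold pvDomChar at h
    simp only [Bool.or_eq_true, Bool.and_eq_true, decide_eq_true_eq, beq_iff_eq] at h
    omega
  have := pvConvAB_aux c.toNat hn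
  rwa [Char.ofNat_toNat] at this

-- where A's depth-scan first returns: the position of the close brace (proof-side specification)
def pvFindClose (cs : List Char) (i : Nat) (d : Int) : Option Nat :=
  if i < cs.length then
    if cs.getD i ' ' = '{' then pvFindClose cs (i+1) (d+1)
    else if cs.getD i ' ' = '}' then
      if d - 1 = 0 then some i else pvFindClose cs (i+1) (d-1)
    else pvFindClose cs (i+1) d
  else none
  termination_by cs.length - i
  decreasing_by all_goals omega

lemma pvFC_end (cs : List Char) (k : Nat) (d : Int) (h : ¬ k < cs.length) :
    pvFindClose cs k d = none := by
  rw [pvFindClose, if_neg h]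

lemma pvFC_open (cs : List Char) (k : Nat) (d : Int) (hk : k < cs.length)
    (hc : cs.getD k ' ' = '{') : pvFindClose cs k d = pvFindClose cs (k+1) (d+1) := by
  rw [pvFindClose, if_pos hk, if_pos hc]

lemma pvFC_close_hit (cs : List Char) (k : Nat) (hk : k < cs.length)
    (hc : cs.getD k ' ' = '}') : pvFindClose cs k 1 = some k := by
  rw [pvFindClose, if_pos hk, if_neg (by rw [hc]; decide), if_pos hc,
    if_pos (by decide : (1 : Int) - 1 = 0)]

lemma pvFC_close_miss (cs : List Char) (k : Nat) (d : Int) (hk : k < cs.length)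
    (hc : cs.getD k ' ' = '}') (hd : ¬ d - 1 = 0) :
    pvFindClose cs k d = pvFindClose cs (k+1) (d-1) := by
  rw [pvFindClose, if_pos hk, if_neg (by rw [hc]; decide), if_pos hc, if_neg hd]

lemma pvFC_other (cs : List Char) (k : Nat) (d : Int) (hk : k < cs.length)
    (h1 : ¬ cs.getD k ' ' = '{') (h2 : ¬ cs.getD k ' ' = '}') :
    pvFindClose cs k d = pvFindClose cs (k+1) d := by
  rw [pvFindClose, if_pos hk, if_neg h1, if_neg h2]

lemma pvFindClose_bounds (cs : List Char) (i : Nat) (d : Int) :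
    ∀ j, pvFindClose cs i d = some j → i ≤ j ∧ j < cs.length ∧ cs.getD j ' ' = '}' := by
  fun_induction pvFindClose cs i d with
  | case1 i d hi hc ih =>
    intro j hj
    obtain ⟨a, b, c⟩ := ih j hj
    exact ⟨by omega, b, c⟩
  | case2 i d hi hc1 hc2 hd =>
    intro j hj
    simp only [Option.some.injEq] at hj
    subst hj; exact ⟨le_refl _, hi, hc2⟩
  | case3 i d hi hc1 hc2 hd ih =>
    intro j hj
    obtain ⟨a, b, c⟩ := ih j hj
    exact ⟨by omega, b, c⟩
  | case4 i d hi hc1 hc2 ih =>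
    intro j hj
    obtain ⟨a, b, c⟩ := ih j hj
    exact ⟨by omega, b, c⟩
  | case5 i d hi =>
    intro j hj; simp at hj

lemma pvMatchBraceLoop_eq (cs : List Char) (start : Nat) :
    ∀ fuel i d, cs.length - i < fuel →
    pvMatchBraceLoop cs fuel start i d =
      match pvFindClose cs i d with
      | some j => (some (PySem.List.slice cs (some ((start + 1 : Nat) : Int)) (some ((j : Nat) : Int))), j + 1)
      | none => (none, start) := by
  intro fuel
  induction fuel with
  | zero => intro i d h; omega
  | succ f ih =>
    intro i d hf
    rw [pvMatchBraceLoop, pvFindClose]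
    by_cases hi : i < cs.length
    · simp only [if_pos hi]
      by_cases h1 : cs.getD i ' ' = '{'
      · simp only [if_pos h1]; exact ih (i+1) (d+1) (by omega)
      · simp only [if_neg h1]
        by_cases h2 : cs.getD i ' ' = '}'
        · simp only [if_pos h2]
          by_cases h3 : d - 1 = 0
          · simp only [if_pos h3]
          · simp only [if_neg h3]; exact ih (i+1) (d-1) (by omega)
        · simp only [if_neg h2]; exact ih (i+1) d (by omega)
    · simp only [if_neg hi]

-- a caret-group candidate: '^' at p-1, matched '{' at p closing at q
def pvCand (cs : List Char) (p q : Nat) : Prop :=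
  p < cs.length ∧ cs.getD (p-1) ' ' = '^' ∧ cs.getD p ' ' = '{' ∧
    pvFindClose cs (p+1) 1 = some q

-- the first caret-group candidate at open position ≥ p
def pvNext (cs : List Char) (p : Nat) : Option (Nat × Nat) :=
  if h : p < cs.length then
    if cs.getD (p-1) ' ' = '^' ∧ cs.getD p ' ' = '{' then
      match pvFindClose cs (p+1) 1 with
      | some q => some (p, q)
      | none => pvNext cs (p+1)
    else pvNext cs (p+1)
  else none
  termination_by cs.length - p
  decreasing_by all_goals omega

lemma pvNext_bounds (cs : List Char) (p0 : Nat) :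
    ∀ pq, pvNext cs p0 = some pq → p0 ≤ pq.1 ∧ pvCand cs pq.1 pq.2 ∧
      pq.1 + 1 ≤ pq.2 ∧ pq.2 < cs.length := by
  fun_induction pvNext cs p0 with
  | case1 p hp hcb q hq =>
    intro pq hpq
    simp only [Option.some.injEq] at hpq
    subst hpq
    obtain ⟨hb1, hb2, hb3⟩ := pvFindClose_bounds cs (p+1) 1 q hq
    exact ⟨le_refl _, ⟨hp, hcb.1, hcb.2, hq⟩, hb1, hb2⟩
  | case2 p hp hcb hq ih =>
    intro pq hpq
    obtain ⟨a, b, c⟩ := ih pq hpq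
    exact ⟨by omega, b, c⟩
  | case3 p hp hcb ih =>
    intro pq hpq
    obtain ⟨a, b, c⟩ := ih pq hpq
    exact ⟨by omega, b, c⟩
  | case4 p hp =>
    intro pq hpq; simp at hpq

lemma pvNext_ge (cs : List Char) (p0 : Nat) (h : cs.length ≤ p0) : pvNext cs p0 = none := by
  rw [pvNext]; rw [dif_neg (by omega)]

lemma pvNext_skip (cs : List Char) (p : Nat) (h : ∀ q, ¬ pvCand cs p q) :
    pvNext cs p = pvNext cs (p+1) := by
  rw [pvNext]
  by_cases hp : p < cs.length
  · rw [dif_pos hp]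
    by_cases hcb : cs.getD (p-1) ' ' = '^' ∧ cs.getD p ' ' = '{'
    · rw [if_pos hcb]
      cases hq : pvFindClose cs (p+1) 1 with
      | some q => exact absurd ⟨hp, hcb.1, hcb.2, hq⟩ (h q)
      | none => rfl
    · rw [if_neg hcb]
  · rw [dif_neg hp, pvNext_ge cs (p+1) (by omega)]

lemma pvNext_cand (cs : List Char) (p q : Nat) (h : pvCand cs p q) :
    pvNext cs p = some (p, q) := by
  obtain ⟨hp, hc1, hc2, hm⟩ := h
  rw [pvNext, dif_pos hp, if_pos ⟨hc1, hc2⟩, hm]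

-- _expand_singles as structural recursion (B's semantics: a trailing '^c' is expanded)
def pvSing (f : Char → Char) : List Char → List Char
  | a :: b :: t => if a = '^' ∧ PySem.Chars.isalnum b = true then f b :: pvSing f t
                   else a :: pvSing f (b :: t)
  | [a] => [a]
  | [] => []

-- A's variant: '^c' needs a character after it ('i + 2 < len')
def pvSingEnd (f : Char → Char) : List Char → List Char
  | a :: b :: t => if a = '^' ∧ PySem.Chars.isalnum b = true ∧ t ≠ [] then f b :: pvSingEnd f t
                   else a :: pvSingEnd f (b :: t)
  | [a] => [a]
  | [] => []

-- the common assembly skeleton: alternate plain segments and caret-groups; 'fin' renders the last segment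
def pvAsm (f : Char → Char) (fin : List Char → List Char) (cs : List Char) (pos : Nat) :
    List Char :=
  match h : pvNext cs (pos+1) with
  | some pq =>
      pvSing f ((cs.drop pos).take (pq.1 - 1 - pos)) ++
      ((cs.drop (pq.1 + 1)).take (pq.2 - (pq.1 + 1))).map f ++
      pvAsm f fin cs (pq.2 + 1)
  | none => fin (cs.drop pos)
  termination_by cs.length - pos
  decreasing_by
    have := pvNext_bounds cs (pos+1) pq h
    omega


lemma pvAsm_none (f : Char → Char) (fin : List Char → List Char) (cs : List Char) (pos : Nat)
    (h : pvNext cs (pos+1) = none) : pvAsm f fin cs pos = fin (cs.drop pos) := by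
  rw [pvAsm]
  split
  · rename_i pq heq; rw [h] at heq; simp at heq
  · rfl

lemma pvAsm_some (f : Char → Char) (fin : List Char → List Char) (cs : List Char) (pos p q : Nat)
    (h : pvNext cs (pos+1) = some (p, q)) :
    pvAsm f fin cs pos =
      pvSing f ((cs.drop pos).take (p - 1 - pos)) ++
      ((cs.drop (p + 1)).take (q - (p + 1))).map f ++ pvAsm f fin cs (q + 1) := by
  rw [pvAsm]
  split
  · rename_i pq heq
    rw [h] at heq
    simp only [Option.some.injEq] at heq
    subst heq; rfl
  · rename_i heq; rw [h] at heq; simp at heq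

lemma drop_getD (cs : List Char) (i : Nat) (h : i < cs.length) :
    cs.drop i = cs.getD i ' ' :: cs.drop (i+1) := by
  rw [List.drop_eq_getElem_cons h, List.getD_eq_getElem?_getD, List.getElem?_eq_getElem h]
  rfl

lemma sing_nil (f : Char → Char) : pvSing f [] = [] := rfl
lemma singEnd_nil (f : Char → Char) : pvSingEnd f [] = [] := rfl

lemma sing_cons (f : Char → Char) (a : Char) (t : List Char)
    (hg : ∀ b t', t = b :: t' → ¬(a = '^' ∧ PySem.Chars.isalnum b = true)) :
    pvSing f (a :: t) = a :: pvSing f t := by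
  cases t with
  | nil => rfl
  | cons b t' => rw [pvSing, if_neg (hg b t' rfl)]

lemma sing_expand (f : Char → Char) (b : Char) (t : List Char)
    (hb : PySem.Chars.isalnum b = true) :
    pvSing f ('^' :: b :: t) = f b :: pvSing f t := by
  rw [pvSing, if_pos ⟨rfl, hb⟩]

lemma singEnd_cons (f : Char → Char) (a : Char) (t : List Char)
    (hg : ∀ b t', t = b :: t' → ¬(a = '^' ∧ PySem.Chars.isalnum b = true ∧ t' ≠ [])) :
    pvSingEnd f (a :: t) = a :: pvSingEnd f t := by
  cases t with
  | nil => rfl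
  | cons b t' => rw [pvSingEnd, if_neg (hg b t' rfl)]

lemma singEnd_expand (f : Char → Char) (b : Char) (t : List Char)
    (hb : PySem.Chars.isalnum b = true) (ht : t ≠ []) :
    pvSingEnd f ('^' :: b :: t) = f b :: pvSingEnd f t := by
  rw [pvSingEnd, if_pos ⟨rfl, hb, ht⟩]

-- peel a literal character off the assembly
lemma peel_lit (f : Char → Char) (cs : List Char) (i : Nat) (hi : i < cs.length)
    (hskip : pvNext cs (i+1) = pvNext cs (i+2))
    (hEndG : ¬(cs.getD i ' ' = '^' ∧ PySem.Chars.isalnum (cs.getD (i+1) ' ') = true ∧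
      i + 2 < cs.length))
    (hSingG : pvNext cs (i+1) = none ∨
      ¬(cs.getD i ' ' = '^' ∧ PySem.Chars.isalnum (cs.getD (i+1) ' ') = true)) :
    pvAsm f (pvSingEnd f) cs i = cs.getD i ' ' :: pvAsm f (pvSingEnd f) cs (i+1) := by
  cases h2 : pvNext cs (i+2) with
  | none =>
    have h1 : pvNext cs (i+1) = none := by rw [hskip, h2]
    rw [pvAsm_none f _ cs i h1, pvAsm_none f _ cs (i+1) h2, drop_getD cs i hi]
    apply singEnd_cons
    intro b t' hbt
    have hlen : i + 1 < cs.length := by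
      by_contra hno
      rw [List.drop_eq_nil_of_le (by omega)] at hbt
      simp at hbt
    rw [drop_getD cs (i+1) hlen] at hbt
    obtain ⟨rfl, rfl⟩ : b = cs.getD (i+1) ' ' ∧ t' = cs.drop (i+2) := by
      injection hbt with h1 h2
      exact ⟨h1.symm, h2.symm⟩
    rintro ⟨ha, hb, ht⟩
    apply hEndG
    refine ⟨ha, hb, ?_⟩
    by_contra hno
    rw [List.drop_eq_nil_of_le (by omega)] at ht
    exact ht rfl
  | some pq =>
    have h1 : pvNext cs (i+1) = some pq := by rw [hskip, h2]
    obtain ⟨hple, hcand, hq1, hq2⟩ := pvNext_bounds cs (i+2) pq h2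
    rw [pvAsm_some f _ cs i pq.1 pq.2 (by rw [h1]),
        pvAsm_some f _ cs (i+1) pq.1 pq.2 (by rw [h2])]
    have hidx : pq.1 - 1 - i = (pq.1 - 1 - (i+1)) + 1 := by omega
    rw [hidx, drop_getD cs i hi, List.take_succ_cons]
    rw [sing_cons]
    · simp [List.cons_append]
    · intro b t' hbt
      have hlen : i + 1 < cs.length := by
        by_contra hno
        rw [List.drop_eq_nil_of_le (by omega)] at hbt
        simp at hbt
      rw [drop_getD cs (i+1) hlen] at hbt
      have hb : b = cs.getD (i+1) ' ' := by
        cases hk : pq.1 - 1 - (i+1) with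
        | zero => rw [hk] at hbt; simp at hbt
        | succ k =>
          rw [hk, List.take_succ_cons] at hbt
          injection hbt with hh _
          exact hh.symm
      subst hb
      rcases hSingG with hs | hs
      · rw [hs] at h1; simp at h1
      · exact hs

-- peel a single '^c' expansion off the assembly
lemma peel_expand (f : Char → Char) (cs : List Char) (i : Nat) (hi : i < cs.length)
    (hc : cs.getD i ' ' = '^') (hi1 : i + 1 < cs.length)
    (hb : PySem.Chars.isalnum (cs.getD (i+1) ' ') = true)
    (hnb : cs.getD (i+1) ' ' ≠ '{') (hi2 : i + 2 < cs.length) :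
    pvAsm f (pvSingEnd f) cs i = f (cs.getD (i+1) ' ') :: pvAsm f (pvSingEnd f) cs (i+2) := by
  have hsk1 : pvNext cs (i+1) = pvNext cs (i+2) := by
    apply pvNext_skip
    intro q hcand
    exact hnb hcand.2.2.1
  have hsk2 : pvNext cs (i+2) = pvNext cs (i+3) := by
    apply pvNext_skip
    intro q hcand
    have : cs.getD (i+1) ' ' = '^' := by
      have := hcand.2.1
      simpa using this
    rw [this] at hb
    exact absurd hb (by decide)
  have hdi : cs.drop i = '^' :: cs.getD (i+1) ' ' :: cs.drop (i+2) := by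
    rw [drop_getD cs i hi, hc, drop_getD cs (i+1) hi1]
  cases h3 : pvNext cs (i+3) with
  | none =>
    rw [pvAsm_none f _ cs i (by rw [hsk1, hsk2, h3]), pvAsm_none f _ cs (i+2) h3, hdi]
    rw [singEnd_expand f _ _ hb]
    intro hno
    rw [List.drop_eq_nil_iff] at hno
    omega
  | some pq =>
    obtain ⟨hple, hcand, hq1, hq2⟩ := pvNext_bounds cs (i+3) pq h3
    rw [pvAsm_some f _ cs i pq.1 pq.2 (by rw [hsk1, hsk2, h3]),
        pvAsm_some f _ cs (i+2) pq.1 pq.2 (by rw [h3])]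
    have hidx : pq.1 - 1 - i = (pq.1 - 1 - (i+2)) + 2 := by omega
    have hidx2 : pq.1 - 1 - (i+2) + 2 = (pq.1 - 1 - (i+2) + 1) + 1 := by omega
    rw [hidx, hdi, hidx2, List.take_succ_cons, List.take_succ_cons, sing_expand f _ _ hb]
    simp [List.cons_append]

-- peel a '^{...}' group off the assembly
lemma peel_group (f : Char → Char) (cs : List Char) (i j : Nat) (hi : i < cs.length)
    (hc : cs.getD i ' ' = '^') (hi1 : i + 1 < cs.length) (hbr : cs.getD (i+1) ' ' = '{')
    (hm : pvFindClose cs (i+2) 1 = some j) :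
    pvAsm f (pvSingEnd f) cs i =
      ((cs.drop (i+2)).take (j - (i+2))).map f ++ pvAsm f (pvSingEnd f) cs (j+1) := by
  have hcand : pvCand cs (i+1) j := by
    refine ⟨hi1, ?_, hbr, hm⟩
    simpa using hc
  rw [pvAsm_some f _ cs i (i+1) j (pvNext_cand cs (i+1) j hcand)]
  have h0 : i + 1 - 1 - i = 0 := by omega
  rw [h0, List.take_zero, sing_nil, List.nil_append]


-- A's main loop computes the assembly (with A's end-of-string single rule)
lemma pvMainA_asm (cs : List Char) : ∀ fuel i acc, cs.length - i < fuel →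
    pvMainA cs fuel i acc = acc ++ pvAsm pvConvA (pvSingEnd pvConvA) cs i := by
  intro fuel
  induction fuel with
  | zero => intro i acc h; omega
  | succ f ih =>
    intro i acc hf
    by_cases hi : i < cs.length
    · rw [pvMainA, if_pos hi]
      by_cases hb1 : cs.getD i ' ' = '^' ∧ i + 1 < cs.length ∧ cs.getD (i+1) ' ' = '{'
      · rw [if_pos hb1]
        cases hF : pvFindClose cs (i+2) 1 with
        | some j =>
          have hmb : pvMatchBrace cs (i+1) =
              (some (PySem.List.slice cs (some ((i + 1 + 1 : Nat) : Int)) (some ((j : Nat) : Int))), j + 1) := by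
            unfold pvMatchBrace
            rw [if_neg (by push_neg; exact ⟨by omega, hb1.2.2⟩)]
            rw [pvMatchBraceLoop_eq cs (i+1) (cs.length + 1) (i+1) 0 (by omega)]
            rw [pvFC_open cs (i+1) 0 hb1.2.1 hb1.2.2]
            norm_num
            rw [hF]
          rw [hmb]
          show pvMainA cs f (j+1) (acc ++ pvSupChars _) = _
          obtain ⟨hj1, hj2, hj3⟩ := pvFindClose_bounds cs (i+2) 1 j hF
          rw [ih (j+1) _ (by omega), pvSupChars_eq_map]
          have hsl : PySem.List.slice cs (some ((i + 1 + 1 : Nat) : Int)) (some ((j : Nat) : Int)) =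
              (cs.drop (i+2)).take (j - (i+2)) := PySem.List.slice_natCast cs (i+2) j
          rw [hsl, peel_group pvConvA cs i j hi hb1.1 hb1.2.1 hb1.2.2 hF]
          simp [List.append_assoc]
        | none =>
          have hmb : pvMatchBrace cs (i+1) = (none, i+1) := by
            unfold pvMatchBrace
            rw [if_neg (by push_neg; exact ⟨by omega, hb1.2.2⟩)]
            rw [pvMatchBraceLoop_eq cs (i+1) (cs.length + 1) (i+1) 0 (by omega)]
            rw [pvFC_open cs (i+1) 0 hb1.2.1 hb1.2.2]
            norm_num
            rw [hF]
          rw [hmb]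
          show pvMainA cs f (i+1) (acc ++ [cs.getD i ' ']) = _
          rw [ih (i+1) _ (by omega)]
          rw [peel_lit pvConvA cs i hi ?hsk ?hend ?hsng]
          · simp [List.append_assoc]
          case hsk =>
            apply pvNext_skip
            intro q hcand
            have := hcand.2.2.2
            simp only [show i + 1 + 1 = i + 2 by omega] at this
            rw [hF] at this
            simp at this
          case hend =>
            rintro ⟨-, halnum, -⟩
            rw [hb1.2.2] at halnum
            exact absurd halnum (by decide)
          case hsng =>
            right
            rintro ⟨-, halnum⟩
            rw [hb1.2.2] at halnum
            exact absurd halnum (by decide)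
      · rw [if_neg hb1]
        by_cases hb2 : cs.getD i ' ' = '^' ∧ i + 2 < cs.length ∧
            PySem.Chars.isalnum (cs.getD (i+1) ' ') = true
        · rw [if_pos hb2]
          have hnb : cs.getD (i+1) ' ' ≠ '{' := by
            intro hno
            rw [hno] at hb2
            exact absurd hb2.2.2 (by decide)
          rw [ih (i+2) _ (by omega)]
          rw [peel_expand pvConvA cs i hi hb2.1 (by omega) hb2.2.2 hnb hb2.2.1]
          rw [pvSupChars_eq_map]
          simp [List.append_assoc]
        · rw [if_neg hb2]
          rw [ih (i+1) _ (by omega)]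
          have hnocand1 : ∀ q, ¬ pvCand cs (i+1) q := by
            intro q hcand
            have hcar : cs.getD i ' ' = '^' := by
              have := hcand.2.1
              simpa using this
            exact hb1 ⟨hcar, hcand.1, hcand.2.2.1⟩
          rw [peel_lit pvConvA cs i hi (pvNext_skip cs (i+1) hnocand1) ?hend ?hsng]
          · simp [List.append_assoc]
          case hend =>
            rintro ⟨hx, hy, hz⟩
            exact hb2 ⟨hx, hz, hy⟩
          case hsng =>
            by_cases hca : cs.getD i ' ' = '^' ∧ PySem.Chars.isalnum (cs.getD (i+1) ' ') = true
            · left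
              have hlen : cs.length ≤ i + 2 := by
                by_contra hno
                exact hb2 ⟨hca.1, by omega, hca.2⟩
              rw [pvNext_skip cs (i+1) hnocand1, pvNext_ge cs (i+2) hlen]
            · right; exact hca
    · rw [pvMainA, if_neg hi]
      rw [pvAsm_none _ _ cs i (pvNext_ge cs (i+1) (by omega))]
      rw [List.drop_eq_nil_of_le (by omega), singEnd_nil, List.append_nil]

-- A characterized
lemma A_char (s : String) :
    expand_superscripts_py s =
      String.ofList (pvAsm pvConvA (pvSingEnd pvConvA) s.toList 0) := by
  unfold expand_superscripts_py
  rw [pvMainA_asm s.toList (s.toList.length + 1) 0 [] (by omega), List.nil_append]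


-- B's _expand_singles loop computes pvSing
lemma pvSinglesLoop_sing (t : List Char) : ∀ fuel i acc, t.length - i < fuel →
    pvSinglesLoop t fuel i acc = acc ++ pvSing pvConvB (t.drop i) := by
  intro fuel
  induction fuel with
  | zero => intro i acc h; omega
  | succ f ih =>
    intro i acc hf
    by_cases hi : i < t.length
    · rw [pvSinglesLoop, if_pos hi]
      by_cases hc : t.getD i ' ' = '^' ∧ i + 1 < t.length ∧
          PySem.Chars.isalnum (t.getD (i+1) ' ') = true
      · rw [if_pos hc, ih (i+2) _ (by omega)]
        rw [drop_getD t i hi, hc.1, drop_getD t (i+1) hc.2.1, sing_expand _ _ _ hc.2.2]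
        simp [List.append_assoc]
      · rw [if_neg hc, ih (i+1) _ (by omega)]
        rw [drop_getD t i hi, sing_cons]
        · simp [List.append_assoc]
        · intro b t' hbt
          have hlen : i + 1 < t.length := by
            by_contra hno
            rw [List.drop_eq_nil_of_le (by omega)] at hbt
            simp at hbt
          rw [drop_getD t (i+1) hlen] at hbt
          injection hbt with h1 h2
          rintro ⟨ha, hb⟩
          rw [← h1] at hb; exact hc ⟨ha, hlen, hb⟩
    · rw [pvSinglesLoop, if_neg hi, List.drop_eq_nil_of_le (by omega), sing_nil,
        List.append_nil]

lemma pvExpandSingles_eq (t : List Char) : pvExpandSingles t = pvSing pvConvB t := by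
  unfold pvExpandSingles
  rw [pvSinglesLoop_sing t (t.length + 1) 0 [] (by omega), List.nil_append, List.drop_zero]

-- the canonical pair list: every matched open brace with its close, by ascending open position
def pvCanon (cs : List Char) : List (Nat × Nat) :=
  (List.range cs.length).filterMap (fun p =>
    if cs.getD p ' ' = '{' then (pvFindClose cs (p+1) 1).map (fun q => (p, q)) else none)

lemma canon_f_some (cs : List Char) (p : Nat) (b : Nat × Nat)
    (h : (if cs.getD p ' ' = '{' then (pvFindClose cs (p+1) 1).map (fun q => (p, q)) else none)
        = some b) :
    b.1 = p ∧ cs.getD p ' ' = '{' ∧ pvFindClose cs (p+1) 1 = some b.2 := by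
  split at h
  · rename_i hbr
    rw [Option.map_eq_some_iff] at h
    obtain ⟨q, hq, rfl⟩ := h
    exact ⟨rfl, hbr, hq⟩
  · simp at h

lemma canon_mem (cs : List Char) (pq : Nat × Nat) :
    pq ∈ pvCanon cs ↔ pq.1 < cs.length ∧ cs.getD pq.1 ' ' = '{' ∧
      pvFindClose cs (pq.1+1) 1 = some pq.2 := by
  unfold pvCanon
  rw [List.mem_filterMap]
  constructor
  · rintro ⟨p, hp, hf⟩
    obtain ⟨h1, h2, h3⟩ := canon_f_some cs p pq hf
    subst h1
    exact ⟨List.mem_range.1 hp, h2, h3⟩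
  · rintro ⟨h1, h2, h3⟩
    refine ⟨pq.1, List.mem_range.2 h1, ?_⟩
    rw [if_pos h2, h3, Option.map_some]

lemma canon_pairwise (cs : List Char) : (pvCanon cs).Pairwise (fun a b => a.1 < b.1) := by
  unfold pvCanon
  rw [List.pairwise_filterMap]
  apply List.Pairwise.imp ?_ (List.pairwise_lt_range (n := cs.length))
  intro a a' hlt b hb b' hb'
  rw [(canon_f_some cs a b hb).1, (canon_f_some cs a' b' hb').1]
  exact hlt

-- pass 1 restated as an index recursion (what the invariant induction runs on)
def pvPairsRec (cs : List Char) : Nat → List Nat → List (Nat × Nat) → List Nat × List (Nat × Nat)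
  | k, stack, P =>
    if h : k < cs.length then
      if cs.getD k ' ' = '{' then pvPairsRec cs (k+1) (stack ++ [k]) P
      else if cs.getD k ' ' = '}' ∧ stack ≠ [] then
        pvPairsRec cs (k+1) stack.dropLast (P ++ [(stack.getLastD 0, k)])
      else pvPairsRec cs (k+1) stack P
    else (stack, P)
  termination_by k _ _ => cs.length - k
  decreasing_by all_goals omega

lemma pvPairs_eq_rec_aux (cs : List Char) :
    ∀ (l : List Char) (k : Nat) (st : List Nat) (P : List (Nat × Nat)), cs.drop k = l →
    (l.zipIdx k).foldl pvPairsStep (st, P) = pvPairsRec cs k st P := by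
  intro l
  induction l with
  | nil =>
    intro k st P hdrop
    have hk : cs.length ≤ k := by
      have := List.drop_eq_nil_iff.mp hdrop
      omega
    rw [List.zipIdx_nil, List.foldl_nil, pvPairsRec, dif_neg (by omega)]
  | cons c l' ih =>
    intro k st P hdrop
    have hk : k < cs.length := by
      by_contra hno
      rw [List.drop_eq_nil_of_le (by omega)] at hdrop
      simp at hdrop
    have hget? : cs[k]? = some c := by
      have h0 : (cs.drop k)[0]? = some c := by rw [hdrop]; rfl
      rw [List.getElem?_drop] at h0
      simpa using h0
    have hgetD : cs.getD k ' ' = c := by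
      rw [List.getD_eq_getElem?_getD, hget?]; rfl
    have hdrop' : cs.drop (k+1) = l' := by
      have : cs.drop (k+1) = (cs.drop k).drop 1 := by
        rw [← List.drop_drop]
      rw [this, hdrop]; rfl
    rw [List.zipIdx_cons, List.foldl_cons]
    rw [pvPairsRec, dif_pos hk, hgetD]
    by_cases h1 : c = '{'
    · rw [if_pos h1]
      have hstep : pvPairsStep (st, P) (c, k) = (st ++ [k], P) := by
        simp only [pvPairsStep]
        rw [if_pos h1]
      rw [hstep]
      exact ih (k+1) (st ++ [k]) P hdrop'
    · rw [if_neg h1]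
      by_cases h2 : c = '}' ∧ st ≠ []
      · rw [if_pos h2]
        have hstep : pvPairsStep (st, P) (c, k) = (st.dropLast, P ++ [(st.getLastD 0, k)]) := by
          simp only [pvPairsStep]
          rw [if_neg h1, if_pos h2]
        rw [hstep]
        exact ih (k+1) st.dropLast (P ++ [(st.getLastD 0, k)]) hdrop'
      · rw [if_neg h2]
        have hstep : pvPairsStep (st, P) (c, k) = (st, P) := by
          simp only [pvPairsStep]
          rw [if_neg h1, if_neg h2]
        rw [hstep]
        exact ih (k+1) st P hdrop'

lemma pvPairs_eq_rec (cs : List Char) : pvPairs cs = (pvPairsRec cs 0 [] []).2 := by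
  unfold pvPairs
  rw [pvPairs_eq_rec_aux cs cs 0 [] [] rfl]

-- the invariant of the stack sweep
def pvInvP (cs : List Char) (k : Nat) (st : List Nat) (P : List (Nat × Nat)) : Prop :=
  st.Pairwise (· < ·) ∧
  (∀ p ∈ st, p < k ∧ cs.getD p ' ' = '{' ∧ ∀ q, (p, q) ∉ P) ∧
  (∀ p, p < k → cs.getD p ' ' = '{' → p ∈ st ∨ ∃ q, (p, q) ∈ P) ∧
  (∀ p q, (p, q) ∈ P → p < k ∧ cs.getD p ' ' = '{' ∧ pvFindClose cs (p+1) 1 = some q) ∧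
  (∀ i, (h : i < st.length) → pvFindClose cs (st[i]+1) 1 = pvFindClose cs k ((st.length - i : Nat) : Int)) ∧
  (P.map Prod.fst).Nodup

lemma pvInvP_init (cs : List Char) : pvInvP cs 0 [] [] := by
  refine ⟨List.Pairwise.nil, ?_, ?_, ?_, ?_, List.nodup_nil⟩
  · intro p hp; simp at hp
  · intro p hp _; omega
  · intro p q h; simp at h
  · intro i h; simp at h

lemma pvInvP_open (cs : List Char) (k : Nat) (st : List Nat) (P : List (Nat × Nat))
    (hk : k < cs.length) (hc : cs.getD k ' ' = '{')
    (h : pvInvP cs k st P) : pvInvP cs (k+1) (st ++ [k]) P := by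
  obtain ⟨h1, h2, h3, h4, h5, h6⟩ := h
  refine ⟨?_, ?_, ?_, ?_, ?_, h6⟩
  · rw [List.pairwise_append]
    refine ⟨h1, List.pairwise_singleton _ _, ?_⟩
    intro a ha b hb; simp at hb; subst hb; exact (h2 a ha).1
  · intro p hp
    rcases List.mem_append.1 hp with hp | hp
    · obtain ⟨a, b, c⟩ := h2 p hp; exact ⟨by omega, b, c⟩
    · simp at hp
      refine ⟨by omega, by rw [hp]; exact hc, ?_⟩
      intro q hq
      rw [hp] at hq
      exact absurd ((h4 k q hq).1) (by omega)
  · intro p hp hcp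
    rcases Nat.lt_or_ge p k with hpk | hpk
    · rcases h3 p hpk hcp with hmem | hsome
      · exact Or.inl (List.mem_append.2 (Or.inl hmem))
      · exact Or.inr hsome
    · have : p = k := by omega
      subst this; exact Or.inl (by simp)
  · intro p q hg; obtain ⟨a, b, c⟩ := h4 p q hg; exact ⟨by omega, b, c⟩
  · intro i hi
    simp only [List.length_append, List.length_singleton] at hi ⊢
    rcases Nat.lt_or_ge i st.length with hl | hl
    · rw [List.getElem_append_left hl, h5 i hl, pvFC_open cs k _ hk hc]
      congr 1
      omega
    · have : i = st.length := by omega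
      subst this
      have hg2 : (st ++ [k])[st.length]'(by simp) = k := by simp
      rw [hg2]
      norm_num

lemma pvInvP_close_pop (cs : List Char) (k : Nat) (st : List Nat) (P : List (Nat × Nat))
    (hk : k < cs.length) (hc : cs.getD k ' ' = '}') (hne : st ≠ [])
    (h : pvInvP cs k st P) :
    pvInvP cs (k+1) st.dropLast (P ++ [(st.getLastD 0, k)]) := by
  obtain ⟨h1, h2, h3, h4, h5, h6⟩ := h
  have hql : st.getLastD 0 = st.getLast hne := by
    rw [List.getLastD_eq_getLast?, List.getLast?_eq_some_getLast hne]; rfl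
  set q := st.getLast hne with hq
  have hqmem : q ∈ st := List.getLast_mem hne
  have hlenpos : 0 < st.length := List.length_pos_iff.mpr hne
  have hqget : st[st.length - 1]'(by omega) = q := by
    rw [hq, List.getLast_eq_getElem]
  have hsplit : st.dropLast ++ [q] = st := by
    rw [hq]; exact List.dropLast_append_getLast hne
  have hdrop : ∀ p ∈ st.dropLast, p < q := by
    intro p hp
    have hpw := List.pairwise_append.1 (hsplit ▸ h1)
    exact hpw.2.2 p hp q (by simp)
  have hqfacts := h2 q hqmem
  have hF : pvFindClose cs (q+1) 1 = some k := by
    have hlen : st.length - 1 < st.length := by omega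
    have h5' := h5 (st.length - 1) hlen
    rw [hqget] at h5'
    have hone : st.length - (st.length - 1) = 1 := by omega
    rw [hone] at h5'
    rw [h5']
    exact pvFC_close_hit cs k hk hc
  rw [hql]
  refine ⟨h1.sublist (List.dropLast_sublist st), ?_, ?_, ?_, ?_, ?_⟩
  · intro p hp
    have hpq : p ≠ q := by have := hdrop p hp; omega
    have hmem : p ∈ st := List.mem_of_mem_dropLast hp
    obtain ⟨a, b, c⟩ := h2 p hmem
    refine ⟨by omega, b, ?_⟩
    intro q' hq'
    rcases List.mem_append.1 hq' with hin | hin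
    · exact c q' hin
    · simp at hin
      exact hpq hin.1
  · intro p hp hcp
    rcases Nat.lt_or_ge p k with hpk | hpk
    · rcases h3 p hpk hcp with hmem | hsome
      · rw [← hsplit] at hmem
        rcases List.mem_append.1 hmem with hmem2 | hmem2
        · exact Or.inl hmem2
        · simp at hmem2
          subst hmem2
          exact Or.inr ⟨k, List.mem_append.2 (Or.inr (by simp))⟩
      · obtain ⟨q', hq'⟩ := hsome
        exact Or.inr ⟨q', List.mem_append.2 (Or.inl hq')⟩
    · exfalso
      have : p = k := by omega
      subst this
      rw [hcp] at hc; exact absurd hc (by decide)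
  · intro p q' hg
    rcases List.mem_append.1 hg with hin | hin
    · obtain ⟨a, b, c⟩ := h4 p q' hin
      exact ⟨by omega, b, c⟩
    · simp at hin
      obtain ⟨rfl, rfl⟩ := hin
      exact ⟨by omega, hqfacts.2.1, hF⟩
  · intro i hi
    rw [List.length_dropLast] at hi
    have hget : st.dropLast[i]'(by rw [List.length_dropLast]; exact hi) = st[i]'(by omega) := by
      rw [List.getElem_dropLast]
    rw [hget, h5 i (by omega)]
    rw [List.length_dropLast]
    rw [pvFC_close_miss cs k _ hk hc (by omega)]
    congr 1
    omega
  · have hqnot : q ∉ P.map Prod.fst := by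
      intro hx
      obtain ⟨p', hp', hfst⟩ := List.mem_map.1 hx
      have hpair : p' = (q, p'.2) := by
        cases p'
        simp at hfst
        subst hfst
        rfl
      rw [hpair] at hp'
      exact hqfacts.2.2 p'.2 hp'
    rw [List.map_append]
    simp only [List.map_cons, List.map_nil]
    rw [List.nodup_append]
    refine ⟨h6, List.nodup_singleton _, ?_⟩
    intro x hx b hb
    simp only [List.mem_singleton] at hb
    subst hb
    intro he
    subst he
    exact hqnot hx

lemma pvInvP_close_nil (cs : List Char) (k : Nat) (P : List (Nat × Nat))
    (hk : k < cs.length) (hc : cs.getD k ' ' = '}')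
    (h : pvInvP cs k [] P) : pvInvP cs (k+1) [] P := by
  obtain ⟨h1, h2, h3, h4, h5, h6⟩ := h
  refine ⟨h1, by intro p hp; simp at hp, ?_, ?_, by intro i hi; simp at hi, h6⟩
  · intro p hp hcp
    rcases Nat.lt_or_ge p k with hpk | hpk
    · exact h3 p hpk hcp
    · exfalso
      have : p = k := by omega
      subst this; rw [hcp] at hc; exact absurd hc (by decide)
  · intro p q hg; obtain ⟨a, b, c⟩ := h4 p q hg; exact ⟨by omega, b, c⟩

lemma pvInvP_other (cs : List Char) (k : Nat) (st : List Nat) (P : List (Nat × Nat))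
    (hk : k < cs.length) (hc1 : ¬ cs.getD k ' ' = '{') (hc2 : ¬ cs.getD k ' ' = '}')
    (h : pvInvP cs k st P) : pvInvP cs (k+1) st P := by
  obtain ⟨h1, h2, h3, h4, h5, h6⟩ := h
  refine ⟨h1, ?_, ?_, ?_, ?_, h6⟩
  · intro p hp; obtain ⟨a, b, c⟩ := h2 p hp; exact ⟨by omega, b, c⟩
  · intro p hp hcp
    rcases Nat.lt_or_ge p k with hpk | hpk
    · exact h3 p hpk hcp
    · exfalso
      have : p = k := by omega
      subst this; exact hc1 hcp
  · intro p q hg; obtain ⟨a, b, c⟩ := h4 p q hg; exact ⟨by omega, b, c⟩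
  · intro i hi
    rw [h5 i hi]
    exact pvFC_other cs k _ hk hc1 hc2

lemma pvPairsRec_spec (cs : List Char) (k : Nat) (st : List Nat) (P : List (Nat × Nat)) :
    pvInvP cs k st P →
    (∀ pq : Nat × Nat, pq ∈ (pvPairsRec cs k st P).2 ↔
        pq.1 < cs.length ∧ cs.getD pq.1 ' ' = '{' ∧ pvFindClose cs (pq.1+1) 1 = some pq.2) ∧
    ((pvPairsRec cs k st P).2.map Prod.fst).Nodup := by
  fun_induction pvPairsRec cs k st P with
  | case1 k st P hk hop ih =>
    intro hinv
    exact ih (pvInvP_open cs k st P hk hop hinv)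
  | case2 k st P hk hop hcl ih =>
    intro hinv
    exact ih (pvInvP_close_pop cs k st P hk hcl.1 hcl.2 hinv)
  | case3 k st P hk hop hcl ih =>
    intro hinv
    by_cases hc : cs.getD k ' ' = '}'
    · have hst : st = [] := by
        by_contra hne
        exact hcl ⟨hc, hne⟩
      subst hst
      exact ih (pvInvP_close_nil cs k P hk hc hinv)
    · exact ih (pvInvP_other cs k st P hk hop hc hinv)
  | case4 k st P hk =>
    intro hinv
    obtain ⟨h1, h2, h3, h4, h5, h6⟩ := hinv
    refine ⟨?_, h6⟩
    intro pq
    constructor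
    · intro hmem
      obtain ⟨a, b, c⟩ := h4 pq.1 pq.2 hmem
      have hlt : pq.1 < cs.length := by
        by_contra hno
        rw [List.getD_eq_getElem?_getD, List.getElem?_eq_none (by omega)] at b
        simp at b
      exact ⟨hlt, b, c⟩
    · rintro ⟨hlt, hbr, hfc⟩
      rcases h3 pq.1 (by omega) hbr with hmem | ⟨q', hq'⟩
      · exfalso
        obtain ⟨i, hil, hieq⟩ := List.getElem_of_mem hmem
        have h5' := h5 i hil
        rw [hieq, hfc, pvFC_end cs k _ hk] at h5'
        simp at h5'
      · have := (h4 pq.1 q' hq').2.2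
        rw [hfc] at this
        simp only [Option.some.injEq] at this
        subst this
        cases pq
        exact hq'


-- the first candidate, characterized
lemma pvNext_first (cs : List Char) (p q : Nat) (hc : pvCand cs p q) :
    ∀ n p0, cs.length - p0 < n → p0 ≤ p →
    (∀ p' q', pvCand cs p' q' → p0 ≤ p' → p ≤ p') → pvNext cs p0 = some (p, q) := by
  intro n
  induction n with
  | zero => intro p0 h _ _; omega
  | succ m ih =>
    intro p0 hn hge hmin
    rcases Nat.eq_or_lt_of_le hge with rfl | hlt
    · exact pvNext_cand cs p0 q hc
    · have hskip : pvNext cs p0 = pvNext cs (p0+1) := by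
        apply pvNext_skip
        intro q' hq'
        have := hmin p0 q' hq' (le_refl _)
        omega
      rw [hskip]
      apply ih (p0+1) ?_ (by omega) (fun a b hab hge2 => hmin a b hab (by omega))
      have := hc.1
      omega

-- B's chosen groups, characterized as a recursion on the resume position
def pvChooseRec (cs : List Char) (pos : Nat) : List (Nat × Nat) :=
  match h : pvNext cs (pos+1) with
  | some pq => pq :: pvChooseRec cs (pq.2 + 1)
  | none => []
  termination_by cs.length - pos
  decreasing_by
    have := pvNext_bounds cs (pos+1) pq h
    omega

lemma pvChooseRec_none (cs : List Char) (pos : Nat) (h : pvNext cs (pos+1) = none) :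
    pvChooseRec cs pos = [] := by
  rw [pvChooseRec]
  split
  · rename_i pq heq; rw [h] at heq; simp at heq
  · rfl

lemma pvChooseRec_some (cs : List Char) (pos : Nat) (pq : Nat × Nat)
    (h : pvNext cs (pos+1) = some pq) :
    pvChooseRec cs pos = pq :: pvChooseRec cs (pq.2 + 1) := by
  rw [pvChooseRec]
  split
  · rename_i pq' heq
    rw [h] at heq
    simp only [Option.some.injEq] at heq
    subst heq; rfl
  · rename_i heq; rw [h] at heq; simp at heq

-- the greedy fold over the sorted pair list is pvChooseRec
lemma fold_choose (cs : List Char) : ∀ (L : List (Nat × Nat)) (acc : List (Nat × Nat)) (pos : Nat),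
    L.Pairwise (fun a b => a.1 < b.1) →
    (∀ pq ∈ L, pq.1 < cs.length ∧ cs.getD pq.1 ' ' = '{' ∧
      pvFindClose cs (pq.1+1) 1 = some pq.2) →
    (∀ p q, pvCand cs p q → pos < p → (p, q) ∈ L) →
    ∃ pos', L.foldl (pvChooseStep cs) (acc, pos) = (acc ++ pvChooseRec cs pos, pos') := by
  intro L
  induction L with
  | nil =>
    intro acc pos hpw hval hcomp
    refine ⟨pos, ?_⟩
    rw [List.foldl_nil]
    cases h : pvNext cs (pos+1) with
    | some pq =>
      obtain ⟨hge, hcand, _, _⟩ := pvNext_bounds cs (pos+1) pq h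
      exact absurd (hcomp pq.1 pq.2 hcand (by omega)) (by simp)
    | none => rw [pvChooseRec_none cs pos h, List.append_nil]
  | cons pq L' ih =>
    intro acc pos hpw hval hcomp
    have hvpq := hval pq (by simp)
    have hq12 : pq.1 + 1 ≤ pq.2 :=
      (pvFindClose_bounds cs (pq.1+1) 1 pq.2 hvpq.2.2).1
    rw [List.foldl_cons]
    by_cases hcond : pos < pq.1 ∧ cs.getD (pq.1 - 1) ' ' = '^'
    · have hstep : pvChooseStep cs (acc, pos) pq = (acc ++ [pq], pq.2 + 1) := by
        simp only [pvChooseStep]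
        rw [if_pos hcond]
      rw [hstep]
      have hcand : pvCand cs pq.1 pq.2 := ⟨hvpq.1, hcond.2, hvpq.2.1, hvpq.2.2⟩
      have hnext : pvNext cs (pos+1) = some pq := by
        have hres := pvNext_first cs pq.1 pq.2 hcand (cs.length + 1) (pos+1)
          (by omega) (by omega) ?_
        · exact hres
        · intro p' q' hc' hge'
          rcases List.mem_cons.1 (hcomp p' q' hc' (by omega)) with hin | hin
          · have h1 : p' = pq.1 := congrArg Prod.fst hin
            omega
          · have := (List.pairwise_cons.1 hpw).1 (p', q') hin
            omega
      rw [pvChooseRec_some cs pos pq hnext]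
      have hcomp' : ∀ p q, pvCand cs p q → pq.2 + 1 < p → (p, q) ∈ L' := by
        intro p q hc' hgt
        rcases List.mem_cons.1 (hcomp p q hc' (by omega)) with hin | hin
        · exfalso
          have h1 : p = pq.1 := congrArg Prod.fst hin
          omega
        · exact hin
      obtain ⟨pos', hfold⟩ := ih (acc ++ [pq]) (pq.2 + 1)
        ((List.pairwise_cons.1 hpw).2)
        (fun x hx => hval x (by simp [hx]))
        hcomp'
      refine ⟨pos', ?_⟩
      rw [hfold]
      simp
    · have hstep : pvChooseStep cs (acc, pos) pq = (acc, pos) := by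
        simp only [pvChooseStep]
        rw [if_neg hcond]
      rw [hstep]
      apply ih acc pos ((List.pairwise_cons.1 hpw).2) (fun x hx => hval x (by simp [hx]))
      intro p q hc' hgt
      rcases List.mem_cons.1 (hcomp p q hc' hgt) with hin | hin
      · exfalso
        apply hcond
        have h1 : p = pq.1 := congrArg Prod.fst hin
        refine ⟨by omega, ?_⟩
        rw [← h1]
        exact hc'.2.1
      · exact hin

-- the assembly fold computes pvAsm
lemma fold_asm (cs : List Char) : ∀ n pos out, cs.length - pos < n →
    ((pvChooseRec cs pos).foldl (pvAssembleStep cs) (out, pos)).1 ++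
      pvSing pvConvB (cs.drop (((pvChooseRec cs pos).foldl (pvAssembleStep cs) (out, pos)).2)) =
    out ++ pvAsm pvConvB (pvSing pvConvB) cs pos := by
  intro n
  induction n with
  | zero => intro pos out h; omega
  | succ m ih =>
    intro pos out hn
    cases h : pvNext cs (pos+1) with
    | none =>
      rw [pvChooseRec_none cs pos h, List.foldl_nil, pvAsm_none _ _ cs pos h]
    | some pq =>
      obtain ⟨hge, hcand, hq1, hq2⟩ := pvNext_bounds cs (pos+1) pq h
      rw [pvChooseRec_some cs pos pq h, List.foldl_cons, pvAsm_some _ _ cs pos pq.1 pq.2 (by rw [h])]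
      have hstep : pvAssembleStep cs (out, pos) pq =
          (out ++ pvSing pvConvB ((cs.drop pos).take (pq.1 - 1 - pos)) ++
            ((cs.drop (pq.1 + 1)).take (pq.2 - (pq.1 + 1))).map pvConvB, pq.2 + 1) := by
        simp only [pvAssembleStep]
        rw [pvExpandSingles_eq, PySem.List.slice_natCast, PySem.List.slice_natCast]
      rw [hstep, ih (pq.2 + 1) _ (by omega)]
      simp [List.append_assoc]

-- B characterized
lemma B_char (s : String) :
    expand_superscripts_py_alt s =
      String.ofList (pvAsm pvConvB (pvSing pvConvB) s.toList 0) := by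
  unfold expand_superscripts_py_alt
  have hsorted : PySem.List.sorted (pvPairs s.toList) (fun pq => pq.1) = pvCanon s.toList := by
    apply PySem.List.sorted_eq_of_perm_of_pairwise_lt _ _ _ ?_ (canon_pairwise s.toList)
    have hspec := pvPairsRec_spec s.toList 0 [] [] (pvInvP_init s.toList)
    rw [← pvPairs_eq_rec] at hspec
    have hnodupP : (pvPairs s.toList).Nodup := List.Nodup.of_map Prod.fst hspec.2
    have hnodupC : (pvCanon s.toList).Nodup := by
      have := canon_pairwise s.toList
      exact List.Pairwise.imp (fun {a b} hlt => by intro he; subst he; omega) this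
    rw [List.perm_ext_iff_of_nodup hnodupC hnodupP]
    intro pq
    rw [canon_mem s.toList pq, hspec.1 pq]
  have hchosen : pvChosen s.toList = pvChooseRec s.toList 0 := by
    unfold pvChosen
    rw [hsorted]
    obtain ⟨pos', hfold⟩ := fold_choose s.toList (pvCanon s.toList) [] 0
      (canon_pairwise s.toList)
      (fun pq hpq => (canon_mem s.toList pq).1 hpq)
      (fun p q hc _ => (canon_mem s.toList (p, q)).2 ⟨hc.1, hc.2.2.1, hc.2.2.2⟩)
    rw [hfold, List.nil_append]
  rw [hchosen]
  show String.ofList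
      ((((pvChooseRec s.toList 0).foldl (pvAssembleStep s.toList) ([], 0)).1) ++
        pvExpandSingles (PySem.List.slice s.toList
          (some ((((pvChooseRec s.toList 0).foldl (pvAssembleStep s.toList) ([], 0)).2 : Nat) : Int))
          none)) = _
  have hslice : PySem.List.slice s.toList
      (some ((((pvChooseRec s.toList 0).foldl (pvAssembleStep s.toList) ([], 0)).2 : Nat) : Int))
      none = s.toList.drop (((pvChooseRec s.toList 0).foldl (pvAssembleStep s.toList) ([], 0)).2) := by
    rw [PySem.List.slice_from _ (by positivity)]
    simp
  rw [hslice, pvExpandSingles_eq]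
  have := fold_asm s.toList (s.toList.length + 1) 0 [] (by omega)
  rw [this]
  rfl


-- the trailing-'^c' condition (the shape of D_ on a char list)
def pvTrail (t : List Char) : Prop :=
  2 ≤ t.length ∧ t.getD (t.length - 2) ' ' = '^' ∧
    PySem.Chars.isalnum (t.getD (t.length - 1) ' ') = true

lemma trail_cons (a : Char) (l : List Char) (h : 2 ≤ l.length) :
    pvTrail (a :: l) ↔ pvTrail l := by
  unfold pvTrail
  simp only [List.length_cons]
  have h1 : l.length + 1 - 2 = (l.length - 2) + 1 := by omega
  have h2 : l.length + 1 - 1 = (l.length - 1) + 1 := by omega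
  rw [h1, h2, List.getD_cons_succ, List.getD_cons_succ]
  exact ⟨fun ⟨_, x, y⟩ => ⟨h, x, y⟩, fun ⟨_, x, y⟩ => ⟨by omega, x, y⟩⟩

lemma trail_drop_iff (cs : List Char) (pos : Nat) (h2 : 2 ≤ cs.length)
    (h : pos ≤ cs.length - 2) : pvTrail (cs.drop pos) ↔ pvTrail cs := by
  unfold pvTrail
  rw [List.length_drop]
  have e1 : (cs.drop pos).getD (cs.length - pos - 2) ' ' = cs.getD (cs.length - 2) ' ' := by
    rw [List.getD_eq_getElem?_getD, List.getD_eq_getElem?_getD, List.getElem?_drop]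
    congr 2
    omega
  have e2 : (cs.drop pos).getD (cs.length - pos - 1) ' ' = cs.getD (cs.length - 1) ' ' := by
    rw [List.getD_eq_getElem?_getD, List.getD_eq_getElem?_getD, List.getElem?_drop]
    congr 2
    omega
  rw [e1, e2]
  constructor
  · rintro ⟨_, x, y⟩; exact ⟨h2, x, y⟩
  · rintro ⟨_, x, y⟩; exact ⟨by omega, x, y⟩

lemma singEnd_eq_sing (f : Char → Char) : ∀ n (t : List Char), t.length ≤ n →
    ¬ pvTrail t → pvSingEnd f t = pvSing f t := by
  intro n
  induction n with
  | zero =>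
    intro t ht _
    have : t = [] := by
      cases t with
      | nil => rfl
      | cons a l => simp at ht
    subst this; rfl
  | succ m ih =>
    intro t ht hnt
    match t with
    | [] => rfl
    | [a] => rfl
    | a :: b :: t' =>
      cases t' with
      | nil =>
        have hcond : ¬ (a = '^' ∧ PySem.Chars.isalnum b = true) := by
          intro ⟨ha, hb⟩
          exact hnt ⟨by simp, by simp [ha], by simp [hb]⟩
        rw [pvSingEnd, if_neg (by rintro ⟨x, y, z⟩; exact hcond ⟨x, y⟩)]
        rw [pvSing, if_neg hcond]
        rfl
      | cons c t'' =>
        simp only [List.length_cons] at ht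
        by_cases hcond : a = '^' ∧ PySem.Chars.isalnum b = true
        · rw [pvSingEnd, if_pos ⟨hcond.1, hcond.2, by simp⟩, pvSing, if_pos hcond]
          congr 1
          apply ih _ (by simp only [List.length_cons] at ht ⊢; omega)
          intro htr
          apply hnt
          rcases Nat.lt_or_ge (c :: t'').length 2 with hl | hl
          · exact absurd htr.1 (by omega)
          · rw [trail_cons a _ (by simp only [List.length_cons]; omega), trail_cons b _ hl]
            exact htr
        · rw [pvSingEnd, if_neg (by rintro ⟨x, y, z⟩; exact hcond ⟨x, y⟩),
            pvSing, if_neg hcond]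
          congr 1
          apply ih _ (by simp only [List.length_cons] at ht ⊢; omega)
          intro htr
          apply hnt
          rw [trail_cons a _ (by simp)]
          exact htr

lemma singEnd_len (f : Char → Char) : ∀ n (t : List Char), t.length ≤ n →
    pvTrail t → (pvSingEnd f t).length = (pvSing f t).length + 1 := by
  intro n
  induction n with
  | zero =>
    intro t ht htr
    exact absurd htr.1 (by omega)
  | succ m ih =>
    intro t ht htr
    match t with
    | [] => exact absurd htr.1 (by simp)
    | [a] => exact absurd htr.1 (by simp)
    | a :: b :: t' =>
      cases t' with
      | nil =>
        obtain ⟨_, hx, hy⟩ := htr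
        simp only [List.length_cons, List.length_nil] at hx hy
        norm_num at hx hy
        rw [pvSingEnd, if_neg (by rintro ⟨-, -, z⟩; exact z rfl), pvSing, if_pos ⟨hx, hy⟩]
        rfl
      | cons c t'' =>
        simp only [List.length_cons] at ht
        by_cases hcond : a = '^' ∧ PySem.Chars.isalnum b = true
        · rw [pvSingEnd, if_pos ⟨hcond.1, hcond.2, by simp⟩, pvSing, if_pos hcond]
          simp only [List.length_cons]
          have htr' : pvTrail (c :: t'') := by
            rcases Nat.lt_or_ge (c :: t'').length 2 with hl | hl
            · exfalso
              have h3 : t'' = [] := by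
                cases t'' with
                | nil => rfl
                | cons _ _ => simp at hl
              subst h3
              obtain ⟨_, hx, _⟩ := htr
              simp only [List.length_cons, List.length_nil] at hx
              norm_num at hx
              rw [hx] at hcond
              exact absurd hcond.2 (by decide)
            · rw [← trail_cons b _ hl, ← trail_cons a _ (by simp only [List.length_cons]; omega)]
              exact htr
          rw [ih _ (by simp only [List.length_cons] at ht ⊢; omega) htr']
        · rw [pvSingEnd, if_neg (by rintro ⟨x, y, z⟩; exact hcond ⟨x, y⟩),
            pvSing, if_neg hcond]
          simp only [List.length_cons]
          have htr' : pvTrail (b :: c :: t'') := by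
            rw [← trail_cons a _ (by simp)]
            exact htr
          rw [ih _ (by simp only [List.length_cons] at ht ⊢; omega) htr']

lemma sing_congr (f g : Char → Char) : ∀ n (t : List Char), t.length ≤ n →
    (∀ x ∈ t, f x = g x) → pvSing f t = pvSing g t := by
  intro n
  induction n with
  | zero =>
    intro t ht _
    match t with
    | [] => rfl
    | a :: l => simp at ht
  | succ m ih =>
    intro t ht hfg
    match t with
    | [] => rfl
    | [a] => rfl
    | a :: b :: t' =>
      simp only [List.length_cons] at ht
      by_cases hcond : a = '^' ∧ PySem.Chars.isalnum b = true
      · rw [pvSing, if_pos hcond, pvSing, if_pos hcond, hfg b (by simp),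
          ih t' (by omega) (fun x hx => hfg x (List.mem_cons_of_mem _ (List.mem_cons_of_mem _ hx)))]
      · rw [pvSing, if_neg hcond, pvSing, if_neg hcond,
          ih (b :: t') (by simp only [List.length_cons]; omega) (fun x hx => hfg x (List.mem_cons_of_mem _ hx))]

lemma singEnd_congr (f g : Char → Char) : ∀ n (t : List Char), t.length ≤ n →
    (∀ x ∈ t, f x = g x) → pvSingEnd f t = pvSingEnd g t := by
  intro n
  induction n with
  | zero =>
    intro t ht _
    match t with
    | [] => rfl
    | a :: l => simp at ht
  | succ m ih =>
    intro t ht hfg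
    match t with
    | [] => rfl
    | [a] => rfl
    | a :: b :: t' =>
      simp only [List.length_cons] at ht
      by_cases hcond : a = '^' ∧ PySem.Chars.isalnum b = true ∧ t' ≠ []
      · rw [pvSingEnd, if_pos hcond, pvSingEnd, if_pos hcond, hfg b (by simp),
          ih t' (by omega) (fun x hx => hfg x (List.mem_cons_of_mem _ (List.mem_cons_of_mem _ hx)))]
      · rw [pvSingEnd, if_neg hcond, pvSingEnd, if_neg hcond,
          ih (b :: t') (by simp only [List.length_cons]; omega) (fun x hx => hfg x (List.mem_cons_of_mem _ hx))]

lemma asm_congr (f g : Char → Char) (cs : List Char) (hfg : ∀ x ∈ cs, f x = g x) :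
    ∀ n pos, cs.length - pos < n →
    pvAsm f (pvSingEnd f) cs pos = pvAsm g (pvSingEnd g) cs pos := by
  intro n
  induction n with
  | zero => intro pos h; omega
  | succ m ih =>
    intro pos hn
    cases h : pvNext cs (pos+1) with
    | none =>
      rw [pvAsm_none _ _ cs pos h, pvAsm_none _ _ cs pos h]
      exact singEnd_congr f g _ _ (le_refl _)
        (fun x hx => hfg x (List.mem_of_mem_drop hx))
    | some pq =>
      obtain ⟨hge, hcand, hq1, hq2⟩ := pvNext_bounds cs (pos+1) pq h
      rw [pvAsm_some _ _ cs pos pq.1 pq.2 h, pvAsm_some _ _ cs pos pq.1 pq.2 h]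
      rw [sing_congr f g _ _ (le_refl _)
        (fun x hx => hfg x (List.mem_of_mem_drop (List.mem_of_mem_take hx)))]
      rw [List.map_congr_left
        (fun x hx => hfg x (List.mem_of_mem_drop (List.mem_of_mem_take hx)))]
      rw [ih (pq.2 + 1) (by omega)]

lemma asm_end (f : Char → Char) (cs : List Char) (hnd : ¬ pvTrail cs) :
    ∀ n pos, cs.length - pos < n →
    pvAsm f (pvSingEnd f) cs pos = pvAsm f (pvSing f) cs pos := by
  intro n
  induction n with
  | zero => intro pos h; omega
  | succ m ih =>
    intro pos hn
    cases h : pvNext cs (pos+1) with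
    | none =>
      rw [pvAsm_none _ _ cs pos h, pvAsm_none _ _ cs pos h]
      apply singEnd_eq_sing f _ _ (le_refl _)
      intro htr
      apply hnd
      rcases Nat.lt_or_ge cs.length 2 with hl | hl
      · have := htr.1
        rw [List.length_drop] at this
        omega
      · have hpos : pos ≤ cs.length - 2 := by
          have := htr.1
          rw [List.length_drop] at this
          omega
        exact (trail_drop_iff cs pos hl hpos).1 htr
    | some pq =>
      obtain ⟨hge, hcand, hq1, hq2⟩ := pvNext_bounds cs (pos+1) pq h
      rw [pvAsm_some _ _ cs pos pq.1 pq.2 h, pvAsm_some _ _ cs pos pq.1 pq.2 h,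
        ih (pq.2 + 1) (by omega)]

lemma asm_len (f : Char → Char) (cs : List Char) (hd : pvTrail cs) :
    ∀ n pos, cs.length - pos < n → pos ≤ cs.length - 2 →
    (pvAsm f (pvSingEnd f) cs pos).length = (pvAsm f (pvSing f) cs pos).length + 1 := by
  intro n
  induction n with
  | zero => intro pos h _; omega
  | succ m ih =>
    intro pos hn hpos
    cases h : pvNext cs (pos+1) with
    | none =>
      rw [pvAsm_none _ _ cs pos h, pvAsm_none _ _ cs pos h]
      apply singEnd_len f _ _ (le_refl _)
      exact (trail_drop_iff cs pos hd.1 hpos).2 hd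
    | some pq =>
      obtain ⟨hge, hcand, hq1, hq2⟩ := pvNext_bounds cs (pos+1) pq h
      have hclose : cs.getD pq.2 ' ' = '}' :=
        (pvFindClose_bounds cs (pq.1+1) 1 pq.2 hcand.2.2.2).2.2
      have hq3 : pq.2 + 1 ≤ cs.length - 2 := by
        have hne1 : pq.2 ≠ cs.length - 1 := by
          intro he
          rw [he] at hclose
          have halnum := hd.2.2
          rw [hclose] at halnum
          exact absurd halnum (by decide)
        have hne2 : pq.2 ≠ cs.length - 2 := by
          intro he
          rw [he, hd.2.1] at hclose
          exact absurd hclose (by decide)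
        omega
      rw [pvAsm_some _ _ cs pos pq.1 pq.2 h, pvAsm_some _ _ cs pos pq.1 pq.2 h]
      simp only [List.length_append]
      rw [ih (pq.2 + 1) (by omega) hq3]
      omega
lemma dom_conv (s : String) (hdom : Dom_expand_superscripts_py s) :
    ∀ x ∈ s.toList, pvConvA x = pvConvB x := by
  intro x hx
  apply pvConvAB
  unfold Dom_expand_superscripts_py pvDomStr at hdom
  exact List.all_eq_true.1 hdom x hx

theorem expand_superscripts_py_spec : Claim_unchanged_expand_superscripts_py := by
  intro s hdom
  unfold Spec_expand_superscripts_py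
  intro hND
  rw [A_char, B_char]
  congr 1
  rw [asm_congr pvConvA pvConvB s.toList (dom_conv s hdom) (s.toList.length + 1) 0 (by omega)]
  apply asm_end pvConvB s.toList ?_ (s.toList.length + 1) 0 (by omega)
  intro htr
  exact hND ⟨htr.1, htr.2.1, htr.2.2⟩

set_option maxRecDepth 16384 in
theorem expand_superscripts_py_changed : Claim_changed_expand_superscripts_py := by
  unfold Claim_changed_expand_superscripts_py; decide

theorem expand_superscripts_py_tight : Claim_exact_expand_superscripts_py := by
  intro s hdom hD heq
  rw [A_char, B_char] at heq
  have heql := congrArg String.toList heq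
  simp only [String.toList_ofList] at heql
  have htr : pvTrail s.toList := ⟨hD.1, hD.2.1, hD.2.2⟩
  have h1 : pvAsm pvConvA (pvSingEnd pvConvA) s.toList 0 =
      pvAsm pvConvB (pvSingEnd pvConvB) s.toList 0 :=
    asm_congr pvConvA pvConvB s.toList (dom_conv s hdom) (s.toList.length + 1) 0 (by omega)
  have h2 := asm_len pvConvB s.toList htr (s.toList.length + 1) 0 (by omega) (by omega)
  rw [h1] at heql
  rw [heql] at h2
  omega
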